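-- pv_equiv track=rewrite | github.com/su3inni/algorithm | codetree/예술성.py | nearby
-- ===== SOURCE A (Python) =====
-- def nearby(a,b):
--     count=0
--     for i in range(len(a)):
--         target = a[i]
--         for j in range(len(b)):
--             if abs(target[0]-b[j][0])+abs(target[1]-b[j][1]) ==1 :
--                 count+=1
--     return count
-- ===== SOURCE B (Python) =====
-- def nearby(a, b):
--     cnt = {}
--     for p in b:
--         cnt[p] = cnt.get(p, 0) + 1
--     total = 0
--     for (x, y) in a:
--         total += cnt.get((x + 1, y), 0) + cnt.get((x - 1, y), 0) \
--                + cnt.get((x, y + 1), 0) + cnt.get((x, y - 1), 0)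
--     return total
-- ===== Notes on version B (the rewrite author's own statement) =====
-- stated objective: faster
-- what changed: replaced the nested scan over all (a,b) index pairs by a dict counter of b built once, then a single pass over a summing the counts of each cell's four Manhattan-1 neighbors
import Mathlib
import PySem

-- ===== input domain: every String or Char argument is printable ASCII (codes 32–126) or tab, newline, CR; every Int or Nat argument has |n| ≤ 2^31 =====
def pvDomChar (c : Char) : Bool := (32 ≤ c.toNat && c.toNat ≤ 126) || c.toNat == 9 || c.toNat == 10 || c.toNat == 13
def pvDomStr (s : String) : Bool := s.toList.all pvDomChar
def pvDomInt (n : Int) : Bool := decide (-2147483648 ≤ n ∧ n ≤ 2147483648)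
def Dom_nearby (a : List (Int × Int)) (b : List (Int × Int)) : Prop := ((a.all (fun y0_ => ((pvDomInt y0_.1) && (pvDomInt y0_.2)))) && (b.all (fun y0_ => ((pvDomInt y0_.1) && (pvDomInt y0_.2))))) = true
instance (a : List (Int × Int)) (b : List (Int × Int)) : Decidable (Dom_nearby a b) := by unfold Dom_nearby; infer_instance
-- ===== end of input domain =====

-- B replaces A's nested scan over all index pairs by a dict counter of b and one
-- pass over a summing the counts of the four Manhattan-1 neighbors (faster).

-- ===== PORT A =====
def nearby (a : List (Int × Int)) (b : List (Int × Int)) : Int :=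
  (PySem.List.pyRange 0 (a.length : Int) 1).foldl (fun count i =>
    let target := PySem.List.pyGetD a i (0, 0)
    (PySem.List.pyRange 0 (b.length : Int) 1).foldl (fun count j =>
      let bj := PySem.List.pyGetD b j (0, 0)
      if |target.1 - bj.1| + |target.2 - bj.2| = (1 : Int) then count + 1 else count) count) 0

-- ===== PORT B =====
def nearby_alt (a : List (Int × Int)) (b : List (Int × Int)) : Int :=
  let cnt : PySem.Dict (Int × Int) Int :=
    b.foldl (fun d p => d.insert p (d.getD p 0 + 1)) PySem.Dict.empty
  a.foldl (fun total xy =>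
    total + cnt.getD (xy.1 + 1, xy.2) 0 + cnt.getD (xy.1 - 1, xy.2) 0
          + cnt.getD (xy.1, xy.2 + 1) 0 + cnt.getD (xy.1, xy.2 - 1) 0) 0

-- ===== PRECONDITION & SPEC =====
def Spec_nearby (a : List (Int × Int)) (b : List (Int × Int)) (out : Int) : Prop := out = nearby_alt a b
instance (a : List (Int × Int)) (b : List (Int × Int)) (out : Int) : Decidable (Spec_nearby a b out) := by unfold Spec_nearby; infer_instance

-- ===== CLAIM (what is proved, stated in full; the proofs are below) =====
def Claim_equal_nearby : Prop := ∀ (a : List (Int × Int)) (b : List (Int × Int)), Dom_nearby a b → Spec_nearby a b (nearby a b)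

-- ===== LEMMAS AND PROOFS =====

-- one b-element's contribution: Manhattan distance 1 iff it is one of the 4 neighbors
theorem pv_indicator (p q u v : Int) :
    (if |p - u| + |q - v| = (1 : Int) then (1:Int) else 0)
    = (if (p + 1, q) = ((u, v) : Int × Int) then (1:Int) else 0)
    + (if (p - 1, q) = ((u, v) : Int × Int) then (1:Int) else 0)
    + (if (p, q + 1) = ((u, v) : Int × Int) then (1:Int) else 0)
    + (if (p, q - 1) = ((u, v) : Int × Int) then (1:Int) else 0) := by
  simp only [Int.abs_eq_natAbs, Prod.mk.injEq]
  split_ifs <;> omega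

-- inner loop of A counts the 4 neighbor multiplicities in b
theorem pv_inner (t : Int × Int) (b : List (Int × Int)) (c : Int) :
    b.foldl (fun count bj =>
        if |t.1 - bj.1| + |t.2 - bj.2| = (1 : Int) then count + 1 else count) c
    = c + (b.count (t.1 + 1, t.2) : Int) + (b.count (t.1 - 1, t.2) : Int)
        + (b.count (t.1, t.2 + 1) : Int) + (b.count (t.1, t.2 - 1) : Int) := by
  obtain ⟨p, q⟩ := t
  induction b generalizing c with
  | nil => simp
  | cons x b ih =>
      obtain ⟨u, v⟩ := x
      rw [List.foldl_cons, ih]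
      have h := pv_indicator p q u v
      simp only [List.count_cons, beq_iff_eq, Prod.mk.injEq] at h ⊢
      push_cast
      split_ifs at h ⊢ <;> omega

theorem pv_getD_count (b : List (Int × Int)) (p : Int × Int) :
    (b.foldl (fun d q => d.insert q (d.getD q 0 + 1)) PySem.Dict.empty).getD p 0
    = (b.count p : Int) := by
  rw [PySem.Dict.getD_foldl_insert_add_one]
  simp

theorem pv_bridge (g : Int → (Int × Int) → Int) (xs : List (Int × Int)) (init : Int) :
    (PySem.List.pyRange 0 (xs.length : Int) 1).foldl
      (fun c i => g c (PySem.List.pyGetD xs i ((0 : Int), (0 : Int)))) init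
    = xs.foldl g init :=
  PySem.List.foldl_pyRange_zero_pyGetD' xs ((0 : Int), (0 : Int)) g init

-- ===== VERDICT (by name: the statement is the Claim_ definition above) =====
theorem nearby_spec : Claim_equal_nearby := by
  intro a b _
  show nearby a b = nearby_alt a b
  have hfun : (fun (c : Int) (t : Int × Int) =>
        List.foldl (fun count j =>
          if |t.1 - (PySem.List.pyGetD b j ((0 : Int), (0 : Int))).1|
            + |t.2 - (PySem.List.pyGetD b j ((0 : Int), (0 : Int))).2| = (1 : Int)
          then count + 1 else count) c (PySem.List.pyRange 0 (b.length : Int) 1))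
      = (fun (total : Int) (xy : Int × Int) =>
        total
        + (List.foldl (fun d p => d.insert p (d.getD p 0 + 1)) PySem.Dict.empty b).getD (xy.1 + 1, xy.2) 0
        + (List.foldl (fun d p => d.insert p (d.getD p 0 + 1)) PySem.Dict.empty b).getD (xy.1 - 1, xy.2) 0
        + (List.foldl (fun d p => d.insert p (d.getD p 0 + 1)) PySem.Dict.empty b).getD (xy.1, xy.2 + 1) 0
        + (List.foldl (fun d p => d.insert p (d.getD p 0 + 1)) PySem.Dict.empty b).getD (xy.1, xy.2 - 1) 0) := by
    funext c t
    refine (pv_bridge (fun count bj =>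
      if |t.1 - bj.1| + |t.2 - bj.2| = (1 : Int) then count + 1 else count) b c).trans ?_
    rw [pv_inner]
    simp only [pv_getD_count]
  exact (pv_bridge (fun (c : Int) (t : Int × Int) =>
        List.foldl (fun count j =>
          if |t.1 - (PySem.List.pyGetD b j ((0 : Int), (0 : Int))).1|
            + |t.2 - (PySem.List.pyGetD b j ((0 : Int), (0 : Int))).2| = (1 : Int)
          then count + 1 else count) c (PySem.List.pyRange 0 (b.length : Int) 1)) a 0).trans
    (by rw [hfun]; try rfl)
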